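-- pv_equiv track=rewrite | github.com/ishamibrahim/BasicProgramming | Competitive/get_least_difference_numbers_akam.py | print_minimum_difference
-- ===== SOURCE A (Python) =====
-- from typing import List
--
-- def print_minimum_difference(nums: List[int]):
--     """
--     Solution uses O(n log n) time for sorting and O(n) time for the algorithm
--     with O(1) space used exclusive of final_list
--     """
--     nums.sort()
--     minim = float("INF")
--     previous_min = minim
--     final_list = []
--     for i in range(len(nums)-1):
--         minim = min(minim, nums[i+1] - nums[i])
--         if minim != previous_min:
--             final_list = [(nums[i], nums[i+1])]
--             previous_min = minim
--         else:
--             if nums[i+1] - nums[i] == minim: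
--                 final_list.append((nums[i], nums[i+1]))
--     return final_list
-- ===== SOURCE B (Python) =====
-- from typing import List
--
-- def print_minimum_difference(nums: List[int]):
--     # Two-pass rewrite: sort, compute the global minimum adjacent gap, then
--     # filter the adjacent pairs achieving it. Same in-place sort of nums as A.
--     nums.sort()
--     if len(nums) < 2:
--         return []
--     m = min(nums[i + 1] - nums[i] for i in range(len(nums) - 1))
--     return [(nums[i], nums[i + 1]) for i in range(len(nums) - 1)
--             if nums[i + 1] - nums[i] == m]
-- ===== Notes on version B (the rewrite author's own statement) =====
-- stated objective: simpler
-- what changed: Replaced A's single stateful scan (a running minimum with conditional list reset/append) by a two-pass structure: compute the global minimum adjacent gap, then list the adjacent pairs achieving it; both sort nums in place.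
import Mathlib
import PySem

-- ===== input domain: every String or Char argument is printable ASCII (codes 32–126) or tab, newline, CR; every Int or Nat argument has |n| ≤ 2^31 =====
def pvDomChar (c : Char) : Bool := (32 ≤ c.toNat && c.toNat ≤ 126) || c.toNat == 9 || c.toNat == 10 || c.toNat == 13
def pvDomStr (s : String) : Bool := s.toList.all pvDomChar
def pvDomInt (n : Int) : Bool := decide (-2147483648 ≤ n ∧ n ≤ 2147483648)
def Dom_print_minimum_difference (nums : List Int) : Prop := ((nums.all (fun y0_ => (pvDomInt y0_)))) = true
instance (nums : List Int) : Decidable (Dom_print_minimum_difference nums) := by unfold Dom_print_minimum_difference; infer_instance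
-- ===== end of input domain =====

-- B replaces A's single stateful scan with compute-global-min-then-filter (objective: simpler).
-- Both Pythons sort nums in place; the equivalence proved here is about the return value.

-- ===== PORT A =====
-- Loop body of A on the pair (nums[i], nums[i+1]); state = (minim, previous_min, final_list),
-- with `none` playing float("INF") (min(INF, d) = d; any finite d ≠ INF).
def pvStepA (st : Option Int × Option Int × List (Int × Int)) (p : Int × Int) :
    Option Int × Option Int × List (Int × Int) :=
  let minim := st.1
  let prev := st.2.1
  let fl := st.2.2
  let d := p.2 - p.1
  let minim' : Option Int := some (match minim with | none => d | some m => min m d)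
  if minim' ≠ prev then (minim', minim', [p])
  else (minim', prev, if some d = minim' then fl ++ [p] else fl)

def print_minimum_difference (nums : List Int) : List (Int × Int) :=
  let s := PySem.List.sorted nums (fun x => x) false
  -- for i in range(len(nums)-1); indices i, i+1 are always in range, so pyGetD's default is unreachable
  let r := (PySem.List.pyRange 0 ((s.length : Int) - 1) 1).foldl
    (fun st i => pvStepA st (PySem.List.pyGetD s i 0, PySem.List.pyGetD s (i + 1) 0))
    ((none : Option Int), (none : Option Int), ([] : List (Int × Int)))
  r.2.2

-- ===== PORT B =====
def print_minimum_difference_alt (nums : List Int) : List (Int × Int) :=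
  let s := PySem.List.sorted nums (fun x => x) false
  if s.length < 2 then []
  else
    -- m = min(nums[i+1] - nums[i] for i in range(len(nums)-1)); nonempty since len ≥ 2, so getD's default is unreachable
    let diffs := (PySem.List.pyRange 0 ((s.length : Int) - 1) 1).map
      (fun i => PySem.List.pyGetD s (i + 1) 0 - PySem.List.pyGetD s i 0)
    let m := (PySem.List.min? diffs (fun x => x)).getD 0
    (PySem.List.pyRange 0 ((s.length : Int) - 1) 1).filterMap
      (fun i =>
        if PySem.List.pyGetD s (i + 1) 0 - PySem.List.pyGetD s i 0 = m then
          some (PySem.List.pyGetD s i 0, PySem.List.pyGetD s (i + 1) 0)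
        else none)

-- ===== PRECONDITION & SPEC =====
def Spec_print_minimum_difference (nums : List Int) (out : List (Int × Int)) : Prop := out = print_minimum_difference_alt nums
instance (nums : List Int) (out : List (Int × Int)) : Decidable (Spec_print_minimum_difference nums out) := by unfold Spec_print_minimum_difference; infer_instance

-- ===== CLAIM (what is proved, stated in full; the proofs are below) =====
def Claim_equal_print_minimum_difference : Prop := ∀ (nums : List Int), Dom_print_minimum_difference nums → Spec_print_minimum_difference nums (print_minimum_difference nums)

-- ===== LEMMAS AND PROOFS =====

-- adjacent-pairs view of the index loop
theorem pv_range_pairs_nat (s : List Int) :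
    (List.range (s.length - 1)).map
      (fun (k : Nat) => (PySem.List.pyGetD s ((k : Int)) 0, PySem.List.pyGetD s (((k : Int)) + 1) 0))
      = s.zip s.tail := by
  induction s with
  | nil => simp
  | cons a t ih =>
    cases t with
    | nil => simp
    | cons b u =>
      have hlen : (a :: b :: u).length - 1 = u.length + 1 := by simp
      rw [hlen, List.range_succ_eq_map, List.map_cons, List.map_map]
      have h0 : (PySem.List.pyGetD (a :: b :: u) (((0 : Nat) : Int)) 0,
                 PySem.List.pyGetD (a :: b :: u) ((((0 : Nat) : Int)) + 1) 0) = (a, b) := by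
        have : (((0 : Nat) : Int)) + 1 = ((1 : Nat) : Int) := by norm_num
        rw [this, PySem.List.pyGetD_natCast, PySem.List.pyGetD_natCast]
        simp
      rw [h0]
      have hfun : ∀ k : Nat,
          ((fun (k : Nat) => (PySem.List.pyGetD (a :: b :: u) ((k : Int)) 0,
              PySem.List.pyGetD (a :: b :: u) (((k : Int)) + 1) 0)) ∘ Nat.succ) k
          = (fun (k : Nat) => (PySem.List.pyGetD (b :: u) ((k : Int)) 0,
              PySem.List.pyGetD (b :: u) (((k : Int)) + 1) 0)) k := by
        intro k
        simp only [Function.comp]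
        have g1 : PySem.List.pyGetD (a :: b :: u) ((Nat.succ k : Nat) : Int) 0
            = PySem.List.pyGetD (b :: u) ((k : Int)) 0 := by
          rw [PySem.List.pyGetD_natCast, PySem.List.pyGetD_natCast]
          simp
        have g2 : PySem.List.pyGetD (a :: b :: u) (((Nat.succ k : Nat) : Int) + 1) 0
            = PySem.List.pyGetD (b :: u) (((k : Int)) + 1) 0 := by
          have e1 : ((Nat.succ k : Nat) : Int) + 1 = (((k + 2 : Nat)) : Int) := by push_cast; ring
          have e2 : ((k : Nat) : Int) + 1 = (((k + 1 : Nat)) : Int) := by push_cast; ring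
          rw [e1, e2, PySem.List.pyGetD_natCast, PySem.List.pyGetD_natCast]
          simp
        rw [g1, g2]
      rw [List.map_congr_left (fun k _ => hfun k)]
      have hlen2 : (b :: u).length - 1 = u.length := by simp
      rw [hlen2] at ih
      rw [ih]
      simp [List.zip]

theorem pv_range_pairs (s : List Int) :
    (PySem.List.pyRange 0 ((s.length : Int) - 1) 1).map
      (fun i => (PySem.List.pyGetD s i 0, PySem.List.pyGetD s (i + 1) 0))
      = s.zip s.tail := by
  rw [PySem.List.pyRange_one, List.map_map]
  have h : ((s.length : Int) - 1 - 0).toNat = s.length - 1 := by omega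
  rw [h, ← pv_range_pairs_nat s]
  apply List.map_congr_left
  intro k _
  simp

-- running minimum over the remaining pairs
def pvMfold (m : Int) (ps : List (Int × Int)) : Int :=
  ps.foldl (fun m p => min m (p.2 - p.1)) m

theorem pvMfold_le (ps : List (Int × Int)) (m : Int) : pvMfold m ps ≤ m := by
  induction ps generalizing m with
  | nil => simp [pvMfold]
  | cons p t ih =>
    calc pvMfold m (p :: t) = pvMfold (min m (p.2 - p.1)) t := rfl
      _ ≤ min m (p.2 - p.1) := ih _
      _ ≤ m := min_le_left _ _

-- invariant of A's loop once the first pair has been consumed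
theorem pv_foldA_inv (ps : List (Int × Int)) (m : Int) (acc : List (Int × Int)) :
    List.foldl pvStepA (some m, some m, acc) ps =
      (some (pvMfold m ps), some (pvMfold m ps),
       if pvMfold m ps = m then acc ++ ps.filter (fun p => p.2 - p.1 = m)
       else ps.filter (fun p => p.2 - p.1 = pvMfold m ps)) := by
  induction ps generalizing m acc with
  | nil => simp [pvMfold]
  | cons p t ih =>
    rw [List.foldl_cons]
    by_cases h : min m (p.2 - p.1) = m
    · -- m ≤ d: running minimum unchanged, else branch of A
      have hd : m ≤ p.2 - p.1 := by omega
      have hstep : pvStepA (some m, some m, acc) p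
          = (some m, some m, if p.2 - p.1 = m then acc ++ [p] else acc) := by
        simp [pvStepA, h]
      have hm : pvMfold m (p :: t) = pvMfold m t := by
        show pvMfold (min m (p.2 - p.1)) t = pvMfold m t
        rw [h]
      rw [hstep, ih, hm]
      by_cases h2 : pvMfold m t = m
      · rw [if_pos h2, if_pos h2]
        by_cases hdm : p.2 - p.1 = m <;> simp [hdm]
      · have hle := pvMfold_le t m
        have h3 : ¬ (p.2 - p.1 = pvMfold m t) := by omega
        rw [if_neg h2, if_neg h2]
        simp [h3]
    · -- d < m: the reset branch of A fires
      have hd : p.2 - p.1 < m := by omega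
      have hmin : min m (p.2 - p.1) = p.2 - p.1 := by omega
      have hstep : pvStepA (some m, some m, acc) p
          = (some (p.2 - p.1), some (p.2 - p.1), [p]) := by
        simp [pvStepA, hmin]
        intro h'
        exact absurd h' (by omega)
      have hm : pvMfold m (p :: t) = pvMfold (p.2 - p.1) t := by
        show pvMfold (min m (p.2 - p.1)) t = pvMfold (p.2 - p.1) t
        rw [hmin]
      rw [hstep, ih, hm]
      have hle := pvMfold_le t (p.2 - p.1)
      have hne : ¬ (pvMfold (p.2 - p.1) t = m) := by omega
      rw [if_neg hne]
      by_cases h2 : pvMfold (p.2 - p.1) t = p.2 - p.1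
      · rw [if_pos h2, h2]
        simp
      · rw [if_neg h2]
        have h3 : ¬ (p.2 - p.1 = pvMfold (p.2 - p.1) t) := fun h' => h2 h'.symm
        simp [h3]

-- a guard-comprehension is a filter on the mapped pairs
theorem pv_filterMap_guard (l : List (Int × Int)) (m : Int) :
    l.filterMap (fun p => if p.2 - p.1 = m then some p else none)
      = l.filter (fun p => p.2 - p.1 = m) := by
  induction l with
  | nil => rfl
  | cons p t ih =>
    by_cases h : p.2 - p.1 = m <;> simp [h, ih]

-- both ports on the sorted list
theorem pv_main (s : List Int) :
    (let r := (PySem.List.pyRange 0 ((s.length : Int) - 1) 1).foldl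
        (fun st i => pvStepA st (PySem.List.pyGetD s i 0, PySem.List.pyGetD s (i + 1) 0))
        ((none : Option Int), (none : Option Int), ([] : List (Int × Int)));
      r.2.2)
    = (if s.length < 2 then []
       else
         let diffs := (PySem.List.pyRange 0 ((s.length : Int) - 1) 1).map
            (fun i => PySem.List.pyGetD s (i + 1) 0 - PySem.List.pyGetD s i 0)
         let m := (PySem.List.min? diffs (fun x => x)).getD 0
         (PySem.List.pyRange 0 ((s.length : Int) - 1) 1).filterMap
          (fun i =>
            if PySem.List.pyGetD s (i + 1) 0 - PySem.List.pyGetD s i 0 = m then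
              some (PySem.List.pyGetD s i 0, PySem.List.pyGetD s (i + 1) 0)
            else none)) := by
  have hfoldA : (PySem.List.pyRange 0 ((s.length : Int) - 1) 1).foldl
      (fun st i => pvStepA st (PySem.List.pyGetD s i 0, PySem.List.pyGetD s (i + 1) 0))
      ((none : Option Int), (none : Option Int), ([] : List (Int × Int)))
      = (s.zip s.tail).foldl pvStepA
        ((none : Option Int), (none : Option Int), ([] : List (Int × Int))) := by
    rw [← pv_range_pairs s, List.foldl_map]
  have hdiffs : (PySem.List.pyRange 0 ((s.length : Int) - 1) 1).map
      (fun i => PySem.List.pyGetD s (i + 1) 0 - PySem.List.pyGetD s i 0)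
      = (s.zip s.tail).map (fun p => p.2 - p.1) := by
    rw [← pv_range_pairs s, List.map_map]
    rfl
  have hfm : ∀ m : Int, (PySem.List.pyRange 0 ((s.length : Int) - 1) 1).filterMap
      (fun i =>
        if PySem.List.pyGetD s (i + 1) 0 - PySem.List.pyGetD s i 0 = m then
          some (PySem.List.pyGetD s i 0, PySem.List.pyGetD s (i + 1) 0)
        else none)
      = (s.zip s.tail).filterMap
        (fun p => if p.2 - p.1 = m then some p else none) := by
    intro m
    rw [← pv_range_pairs s, List.filterMap_map]
    rfl
  simp only [hfoldA, hdiffs, hfm]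
  match s with
  | [] => simp
  | [a] => simp
  | a :: b :: t =>
    have hlen : ¬ ((a :: b :: t).length < 2) := by simp
    rw [if_neg hlen]
    have hzip : (a :: b :: t).zip (a :: b :: t).tail = (a, b) :: ((b :: t).zip t) := by
      simp [List.zip]
    rw [hzip]
    -- A's first iteration: minim = INF, previous_min = INF, so the reset branch fires
    have hfirst : pvStepA ((none : Option Int), (none : Option Int), ([] : List (Int × Int))) (a, b)
        = (some (b - a), some (b - a), [(a, b)]) := by
      simp [pvStepA]
    rw [List.foldl_cons, hfirst, pv_foldA_inv]
    -- B's minimum is the same running minimum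
    have hmin : (PySem.List.min? (((a, b) :: ((b :: t).zip t)).map (fun p => p.2 - p.1)) (fun x => x)).getD 0
        = pvMfold (b - a) ((b :: t).zip t) := by
      rw [List.map_cons, PySem.List.min?_id_cons]
      simp [pvMfold, List.foldl_map]
    rw [pv_filterMap_guard, hmin]
    by_cases h2 : pvMfold (b - a) ((b :: t).zip t) = b - a
    · rw [if_pos h2, h2]
      simp
    · rw [if_neg h2]
      have hle := pvMfold_le ((b :: t).zip t) (b - a)
      have h3 : ¬ ((b : Int) - a = pvMfold (b - a) ((b :: t).zip t)) := by omega
      simp [h3]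

-- ===== VERDICT (by name: the statement is the Claim_ definition above) =====
theorem print_minimum_difference_spec : Claim_equal_print_minimum_difference := by
  intro nums _
  unfold Spec_print_minimum_difference print_minimum_difference print_minimum_difference_alt
  exact pv_main (PySem.List.sorted nums (fun x => x) false)
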